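-- pv_equiv track=rewrite | github.com/zh3nl/Interesting-Problems | CodeSignal/Python/String Character Selection/Reverse String Characters in Triplets/solution.py | reversed_triple_chars
-- ===== SOURCE A (Python) =====
-- def reversed_triple_chars(s: str) -> str:
--     # TODO: Implement the function that reform the string as described above
--     result = ''
--     length = len(s)
--     elem_count = 0
--     temp = ''
--
--     for i in range(length):
--         temp += s[i]
--         elem_count += 1
--
--         if elem_count == 3:
--             result += temp[::-1]
--             elem_count = 0
--             temp = ''
--
--     result += temp
--     return result
-- ===== SOURCE B (Python) =====
-- def reversed_triple_chars(s: str) -> str: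
--     chunks = [s[i:i+3] for i in range(0, len(s), 3)]
--     return ''.join(c[::-1] if len(c) == 3 else c for c in chunks)
-- ===== Notes on version B (the rewrite author's own statement) =====
-- stated objective: simpler
-- what changed: Replaces the per-character counter/temp-buffer accumulation loop with slicing the string into 3-character chunks and joining each chunk reversed (last short chunk kept as is).
import Mathlib
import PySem

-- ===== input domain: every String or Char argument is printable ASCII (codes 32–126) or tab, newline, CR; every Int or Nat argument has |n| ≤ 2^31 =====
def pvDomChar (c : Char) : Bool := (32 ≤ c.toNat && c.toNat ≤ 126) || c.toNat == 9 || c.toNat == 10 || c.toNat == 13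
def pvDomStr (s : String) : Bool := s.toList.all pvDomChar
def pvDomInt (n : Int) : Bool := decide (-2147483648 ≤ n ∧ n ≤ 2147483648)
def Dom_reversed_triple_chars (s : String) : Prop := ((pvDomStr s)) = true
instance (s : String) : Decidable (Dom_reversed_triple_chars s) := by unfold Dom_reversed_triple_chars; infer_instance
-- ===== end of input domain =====

-- B slices the string into successive 3-character chunks and joins each full chunk reversed,
-- replacing A's per-character counter/temp-buffer loop (objective: simpler).

-- ===== PORT A =====
-- one loop iteration of A: temp += c; elem_count += 1; if elem_count == 3 flush reversed temp
def pvStepA (st : List Char × Nat × List Char) (c : Char) : List Char × Nat × List Char :=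
  let temp := st.2.2 ++ [c]
  let cnt := st.2.1 + 1
  if cnt = 3 then (st.1 ++ temp.reverse, 0, ([] : List Char)) else (st.1, cnt, temp)

def reversed_triple_chars (s : String) : String :=
  -- for i in range(length): temp += s[i] … — iterated over the same character sequence
  let st := s.toList.foldl pvStepA ([], 0, [])
  String.mk (st.1 ++ st.2.2)

-- ===== PORT B =====
-- s[i:i+3] for i in range(0, len(s), 3): successive chunks of 3 characters
def pvChunks3 (l : List Char) : List (List Char) :=
  match l with
  | [] => []
  | a :: rest => ((a :: rest).take 3) :: pvChunks3 (rest.drop 2)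
termination_by l.length
decreasing_by simp [List.length_drop]

def reversed_triple_chars_alt (s : String) : String :=
  String.mk ((pvChunks3 s.toList).flatMap (fun c => if c.length = 3 then c.reverse else c))

-- ===== PRECONDITION & SPEC =====
def Spec_reversed_triple_chars (s : String) (out : String) : Prop := out = reversed_triple_chars_alt s
instance (s : String) (out : String) : Decidable (Spec_reversed_triple_chars s out) := by unfold Spec_reversed_triple_chars; infer_instance

-- ===== CLAIM (what is proved, stated in full; the proofs are below) =====
def Claim_equal_reversed_triple_chars : Prop := ∀ (s : String), Dom_reversed_triple_chars s → Spec_reversed_triple_chars s (reversed_triple_chars s)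

-- ===== LEMMAS AND PROOFS =====
theorem pvChunks3_nil : pvChunks3 [] = [] := by rw [pvChunks3]
theorem pvChunks3_cons (a : Char) (rest : List Char) :
    pvChunks3 (a :: rest) = ((a :: rest).take 3) :: pvChunks3 (rest.drop 2) := by rw [pvChunks3]
def pvAltCore (l : List Char) : List Char :=
  (pvChunks3 l).flatMap (fun c => if c.length = 3 then c.reverse else c)

theorem pvLoop_eq (n : Nat) (l : List Char) (res : List Char) (h : l.length ≤ n) :
    (let st := l.foldl pvStepA (res, 0, []); st.1 ++ st.2.2) = res ++ pvAltCore l := by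
  induction n generalizing l res with
  | zero =>
    have : l = [] := List.length_eq_zero_iff.mp (Nat.le_zero.mp h)
    subst this
    simp [pvAltCore, pvChunks3_nil, pvChunks3_cons]
  | succ n ih =>
    match l with
    | [] => simp [pvAltCore, pvChunks3_nil, pvChunks3_cons]
    | [a] => simp [pvAltCore, pvChunks3_nil, pvChunks3_cons, pvStepA]
    | [a, b] => simp [pvAltCore, pvChunks3_nil, pvChunks3_cons, pvStepA]
    | a :: b :: c :: rest =>
      have hlen : rest.length ≤ n := by
        simp at h; omega
      have := ih rest (res ++ [c, b, a]) hlen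
      simp only [List.foldl_cons, pvStepA] at *
      simp only [pvAltCore, pvChunks3_nil, pvChunks3_cons] at *
      simp_all [List.append_assoc]

-- ===== VERDICT (by name: the statement is the Claim_ definition above) =====
theorem reversed_triple_chars_spec : Claim_equal_reversed_triple_chars := by
  intro s _
  unfold Spec_reversed_triple_chars reversed_triple_chars reversed_triple_chars_alt
  have := pvLoop_eq s.toList.length s.toList [] le_rfl
  simp only [pvAltCore] at this
  simp only []
  rw [this]
  simp
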